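-- pv_equiv track=rewrite | github.com/jlfowler1084/CareerPilot | src/gmail/filter_config.py | build_gmail_query
-- ===== SOURCE A (Python) =====
-- def build_gmail_query(rule: dict) -> str:
--     """Build a Gmail filter query string from a rule definition."""
--     parts = []
--
--     # from: addresses
--     from_addrs = rule.get("from_addresses", [])
--     if from_addrs:
--         from_clauses = [f"from:{addr}" for addr in from_addrs]
--         parts.append("({})".format(" OR ".join(from_clauses)))
--
--     # from: domains
--     from_domains = rule.get("from_domains", [])
--     if from_domains:
--         domain_clauses = [f"from:@{domain}" for domain in from_domains]
--         parts.append("({})".format(" OR ".join(domain_clauses)))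
--
--     # subject patterns
--     subjects = rule.get("subject_patterns", [])
--     if subjects:
--         subj_clauses = [f'subject:"{s}"' for s in subjects]
--         parts.append("({})".format(" OR ".join(subj_clauses)))
--
--     # If we have both from and subject parts, combine with OR
--     if len(parts) > 1:
--         return " OR ".join(parts)
--     elif len(parts) == 1:
--         return parts[0]
--     else:
--         return ""
-- ===== SOURCE B (Python) =====
-- _GROUPS = [
--     ("from_addresses", "from:", ""),
--     ("from_domains", "from:@", ""),
--     ("subject_patterns", 'subject:"', '"'),
-- ]
--
--
-- def build_gmail_query(rule: dict) -> str:
--     """Build a Gmail filter query string from a rule definition."""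
--
--     def clauses(vals, pre, suf):
--         # non-empty vals: render head, recurse on tail, back-to-front
--         if len(vals) == 1:
--             return pre + vals[0] + suf
--         return pre + vals[0] + suf + " OR " + clauses(vals[1:], pre, suf)
--
--     def go(groups):
--         # build the whole query recursively, right to left, no joins, no parts list
--         if not groups:
--             return ""
--         key, pre, suf = groups[0]
--         rest = go(groups[1:])
--         vals = rule.get(key, [])
--         if not vals:
--             return rest
--         group = "(" + clauses(vals, pre, suf) + ")"
--         return group if not rest else group + " OR " + rest
--
--     return go(_GROUPS)
-- ===== Notes on version B (the rewrite author's own statement) =====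
-- stated objective: alternative
-- what changed: Replaces A's accumulate-a-parts-list plus join plus three-way length branch with a right-to-left recursion over (key, prefix, suffix) groups (and a recursive clause renderer) that concatenates the query directly with explicit ' OR ' separators, never building the parts list or calling join.
import Mathlib
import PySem

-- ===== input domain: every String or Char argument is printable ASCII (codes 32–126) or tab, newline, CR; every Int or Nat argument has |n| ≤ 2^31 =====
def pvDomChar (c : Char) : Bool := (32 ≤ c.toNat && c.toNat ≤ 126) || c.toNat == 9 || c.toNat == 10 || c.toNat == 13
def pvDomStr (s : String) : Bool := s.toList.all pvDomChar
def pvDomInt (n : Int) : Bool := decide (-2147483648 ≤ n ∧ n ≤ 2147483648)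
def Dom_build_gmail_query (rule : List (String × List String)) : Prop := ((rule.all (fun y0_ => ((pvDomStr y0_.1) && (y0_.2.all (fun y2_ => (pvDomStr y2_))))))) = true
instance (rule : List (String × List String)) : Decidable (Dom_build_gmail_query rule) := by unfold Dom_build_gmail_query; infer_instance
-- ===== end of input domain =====

-- B rebuilds the query by a right-to-left recursion over the (key, prefix, suffix) groups,
-- concatenating with explicit " OR " separators instead of A's parts list / join / length branch (alternative decomposition).

-- ===== PORT A =====
def build_gmail_query (rule : List (String × List String)) : String :=
  let parts : List String := []
  let from_addrs := (PySem.Dict.mk rule).getD "from_addresses" []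
  let parts := if from_addrs.isEmpty then parts else
    parts ++ ["(" ++ PySem.Str.join " OR " (from_addrs.map (fun addr => "from:" ++ addr)) ++ ")"]
  let from_domains := (PySem.Dict.mk rule).getD "from_domains" []
  let parts := if from_domains.isEmpty then parts else
    parts ++ ["(" ++ PySem.Str.join " OR " (from_domains.map (fun domain => "from:@" ++ domain)) ++ ")"]
  let subjects := (PySem.Dict.mk rule).getD "subject_patterns" []
  let parts := if subjects.isEmpty then parts else
    parts ++ ["(" ++ PySem.Str.join " OR " (subjects.map (fun s => "subject:\"" ++ s ++ "\"")) ++ ")"]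
  if parts.length > 1 then PySem.Str.join " OR " parts
  else if parts.length = 1 then parts.headD ""
  else ""

-- ===== PORT B =====
-- the (key, prefix, suffix) groups of Source B
def pvGroups : List (String × String × String) :=
  [("from_addresses", "from:", ""),
   ("from_domains", "from:@", ""),
   ("subject_patterns", "subject:\"", "\"")]

-- Source B's `clauses`: renders a non-empty value list back-to-front with explicit " OR " separators
def pvClauses (pre suf : String) : List String → String
  | [] => ""  -- unreachable: Source B only calls clauses on non-empty vals
  | [v] => pre ++ v ++ suf
  | v :: rest => pre ++ v ++ suf ++ " OR " ++ pvClauses pre suf rest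

-- Source B's `go`: recursion over the remaining groups, right to left
def pvGo (rule : List (String × List String)) : List (String × String × String) → String
  | [] => ""
  | g :: gs =>
    let rest := pvGo rule gs
    let vals := (PySem.Dict.mk rule).getD g.1 []
    if vals.isEmpty then rest
    else
      let group := "(" ++ pvClauses g.2.1 g.2.2 vals ++ ")"
      if rest = "" then group else group ++ " OR " ++ rest

def build_gmail_query_alt (rule : List (String × List String)) : String :=
  pvGo rule pvGroups

-- ===== PRECONDITION & SPEC =====
def Spec_build_gmail_query (rule : List (String × List String)) (out : String) : Prop := out = build_gmail_query_alt rule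
instance (rule : List (String × List String)) (out : String) : Decidable (Spec_build_gmail_query rule out) := by unfold Spec_build_gmail_query; infer_instance

-- ===== CLAIM (what is proved, stated in full; the proofs are below) =====
def Claim_equal_build_gmail_query : Prop := ∀ (rule : List (String × List String)), Dom_build_gmail_query rule → Spec_build_gmail_query rule (build_gmail_query rule)

-- ===== LEMMAS AND PROOFS =====

theorem str_join_nil : PySem.Str.join " OR " ([] : List String) = "" := rfl

theorem str_join_singleton (s : String) : PySem.Str.join " OR " [s] = s := by
  simp [PySem.Str.join, PySem.Chars.join_singleton]

theorem ofList_OR (l : List Char) :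
    String.ofList (' ' :: 'O' :: 'R' :: ' ' :: l) = " OR " ++ String.ofList l := by
  rw [show ' ' :: 'O' :: 'R' :: ' ' :: l = [' ','O','R',' '] ++ l from rfl, String.ofList_append]

theorem str_join_cons_cons (a b : String) (t : List String) :
    PySem.Str.join " OR " (a :: b :: t) = a ++ " OR " ++ PySem.Str.join " OR " (b :: t) := by
  simp [PySem.Str.join, PySem.Chars.join_cons_cons]
  rw [ofList_OR, String.append_assoc]

-- Source B's clauses = " OR ".join of the templated values, on non-empty input
theorem pvClauses_eq_join (pre suf : String) (v : String) (vs : List String) :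
    pvClauses pre suf (v :: vs) = PySem.Str.join " OR " ((v :: vs).map (fun x => pre ++ x ++ suf)) := by
  induction vs generalizing v with
  | nil => simp [pvClauses, str_join_singleton]
  | cons w ws ih =>
    have h := ih w
    simp only [List.map_cons] at h ⊢
    rw [str_join_cons_cons, ← h]
    rfl

-- a "(…)" part is never the empty string
theorem paren_ne_empty (x : String) : ("(" ++ x ++ ")") ≠ "" := by
  intro h
  have := congrArg String.toList h
  simp at this

-- " OR ".join of a list of non-empty strings, with a cons head, is non-empty
theorem str_join_cons_ne_empty (a : String) (l : List String) (ha : a ≠ "") :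
    PySem.Str.join " OR " (a :: l) ≠ "" := by
  cases l with
  | nil => rw [str_join_singleton]; exact ha
  | cons b t =>
    rw [str_join_cons_cons]
    intro h
    have := congrArg String.toList h
    simp at this

-- the parts list A accumulates for a list of groups (in partsF form, all elements "(…)"-shaped)
def partsF (rule : List (String × List String)) : List (String × String × String) → List String
  | [] => []
  | g :: gs =>
    let vals := (PySem.Dict.mk rule).getD g.1 []
    (if vals.isEmpty then [] else
      ["(" ++ PySem.Str.join " OR " (vals.map (fun x => g.2.1 ++ x ++ g.2.2)) ++ ")"]) ++ partsF rule gs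

theorem partsF_shape (rule : List (String × List String)) (gs : List (String × String × String)) :
    ∀ p ∈ partsF rule gs, p ≠ "" := by
  induction gs with
  | nil => intro p hp; simp [partsF] at hp
  | cons g gs ih =>
    intro p hp
    simp only [partsF] at hp
    rcases List.mem_append.1 hp with h | h
    · split at h
      · simp at h
      · simp at h; subst h; exact paren_ne_empty _
    · exact ih p h

-- Source B's go computes " OR ".join of the accumulated parts
theorem pvGo_eq_join (rule : List (String × List String)) (gs : List (String × String × String)) :
    pvGo rule gs = PySem.Str.join " OR " (partsF rule gs) := by
  induction gs with
  | nil => rfl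
  | cons g gs ih =>
    simp only [pvGo, partsF, ih]
    split
    · simp
    · rename_i hvals
      have hv : ∃ v vs, (PySem.Dict.mk rule).getD g.1 [] = v :: vs := by
        cases h : (PySem.Dict.mk rule).getD g.1 [] with
        | nil => rw [h] at hvals; simp at hvals
        | cons v vs => exact ⟨v, vs, rfl⟩
      obtain ⟨v, vs, hv⟩ := hv
      rw [hv, pvClauses_eq_join]
      cases hp : partsF rule gs with
      | nil => simp [str_join_nil, str_join_singleton]
      | cons p ps =>
        have hpne : p ≠ "" := partsF_shape rule gs p (by rw [hp]; exact List.mem_cons_self ..)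
        have hne : PySem.Str.join " OR " (p :: ps) ≠ "" := str_join_cons_ne_empty p ps hpne
        rw [if_neg hne, List.singleton_append, str_join_cons_cons]

-- A's three-way length branch is exactly join on every list
theorem finalize_eq_join (l : List String) :
    (if l.length > 1 then PySem.Str.join " OR " l
     else if l.length = 1 then l.headD "" else "") = PySem.Str.join " OR " l := by
  match l with
  | [] => simp [str_join_nil]
  | [s] => simp [str_join_singleton]
  | a :: b :: t => simp

-- ===== VERDICT (by name: the statement is the Claim_ definition above) =====
theorem build_gmail_query_spec : Claim_equal_build_gmail_query := by
  intro rule _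
  unfold Spec_build_gmail_query build_gmail_query_alt
  rw [pvGo_eq_join]
  unfold build_gmail_query
  rw [finalize_eq_join]
  congr 1
  simp only [pvGroups, partsF, List.append_nil]
  split <;> split <;> split <;>
    simp [String.append_assoc]
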